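-- pv_equiv track=rewrite | github.com/mechauk418/BOJ | 프로그래머스/unrated/138476. 귤 고르기/귤 고르기.py | solution
-- ===== SOURCE A (Python) =====
-- from collections import Counter
--
-- def solution(k, tangerine):
--
--     A = dict(Counter(tangerine))
--     B = list(A.values())
--     B.sort()
--     temt = 0
--     cnt=0
--     while True:
--         C = B.pop()
--         cnt+=1
--         temt += C
--         if temt >= k:
--             break
--
--
--     return cnt
-- ===== SOURCE B (Python) =====
-- from collections import Counter
--
--
-- def solution(k, tangerine):
--     # Bucket by group size: buckets[c] = number of kinds having exactly c tangerines.
--     # Walk the distinct sizes from largest to smallest, consuming whole buckets at a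
--     # time; inside the final bucket the number of kinds needed is a ceiling division.
--     buckets = Counter(Counter(tangerine).values())
--     sizes = sorted(buckets, reverse=True)
--     return pick(k, sizes, buckets)
--
--
-- def pick(k, sizes, buckets):
--     c = sizes[0]
--     m = buckets[c]
--     if k <= m * c:
--         return max(1, -(-k // c))  # at least one kind is always picked
--     return m + pick(k - m * c, sizes[1:], buckets)
-- ===== Notes on version B (the rewrite author's own statement) =====
-- stated objective: alternative
-- what changed: Instead of sorting all per-kind counts and popping them one kind at a time, B buckets the counts with a second Counter (kinds per distinct group size), walks the distinct sizes in descending order consuming whole buckets at once, and finishes the last bucket with a ceiling division.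
import Mathlib
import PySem

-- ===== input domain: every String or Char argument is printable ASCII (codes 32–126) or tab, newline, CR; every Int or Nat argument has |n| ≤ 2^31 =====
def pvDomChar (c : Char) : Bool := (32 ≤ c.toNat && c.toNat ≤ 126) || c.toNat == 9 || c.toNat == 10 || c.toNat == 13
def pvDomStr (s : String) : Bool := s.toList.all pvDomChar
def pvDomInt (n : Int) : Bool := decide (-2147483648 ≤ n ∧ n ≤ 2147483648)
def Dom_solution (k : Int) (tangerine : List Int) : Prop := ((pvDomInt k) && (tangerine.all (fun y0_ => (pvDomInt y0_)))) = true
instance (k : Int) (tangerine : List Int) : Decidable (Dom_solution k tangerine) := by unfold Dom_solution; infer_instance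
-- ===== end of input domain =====

-- B replaces A's per-kind pop-until-satisfied loop by bucketing the kind counts with a second
-- Counter and consuming whole buckets of equal-sized kinds at once, with a ceiling division
-- inside the final bucket (alternative decomposition).

-- ===== PORT A =====
-- the 'while True: C = B.pop(); cnt += 1; temt += C; if temt >= k: break' loop
-- (the [] case is Python's IndexError from pop(); excluded by Pre_solution)
def solLoopA (k : Int) (B : List Int) (temt cnt : Int) : Int :=
  match h : PySem.List.pop? B (-1) with
  | none => 0
  | some (C, B') =>
    if temt + C ≥ k then cnt + 1
    else solLoopA k B' (temt + C) (cnt + 1)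
termination_by B.length
decreasing_by
  have := PySem.List.length_of_pop?_eq_some B h
  simp only [] at this
  omega

def solution (k : Int) (tangerine : List Int) : Int :=
  let A := PySem.Dict.counter tangerine
  let B := A.values
  let Bs := PySem.List.sorted B (fun x => x) false
  solLoopA k Bs 0 0

-- ===== PORT B =====
-- def pick(k, sizes, buckets): c = sizes[0]; m = buckets[c];
--   if k <= m*c: return max(1, -(-k//c))  else: return m + pick(k - m*c, sizes[1:], buckets)
-- (the [] case is Python's IndexError from sizes[0]; excluded by Pre_solution)
def pickB (buckets : PySem.Dict Int Int) (k : Int) : List Int → Int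
  | [] => 0
  | c :: rest =>
    let m := buckets.getD c 0
    if k ≤ m * c then max 1 (-(PySem.Int.floordiv (-k) c))
    else m + pickB buckets (k - m * c) rest

def solution_alt (k : Int) (tangerine : List Int) : Int :=
  let buckets := PySem.Dict.counter (PySem.Dict.counter tangerine).values
  let sizes := PySem.List.sorted buckets.keys (fun x => x) true
  pickB buckets k sizes

-- ===== PRECONDITION & SPEC =====
-- exactly where A returns: pop() raises IndexError when tangerine is empty or k exceeds
-- the total number of tangerines (the sum of all counts is tangerine.length)
def Pre_solution (k : Int) (tangerine : List Int) : Prop :=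
  tangerine ≠ [] ∧ k ≤ (tangerine.length : Int)
instance (k : Int) (tangerine : List Int) : Decidable (Pre_solution k tangerine) := by
  unfold Pre_solution; infer_instance

def pvWitness_solution : Int × List Int := (2, [1, 1, 2])

def Spec_solution (k : Int) (tangerine : List Int) (out : Int) : Prop := out = solution_alt k tangerine
instance (k : Int) (tangerine : List Int) (out : Int) : Decidable (Spec_solution k tangerine out) := by unfold Spec_solution; infer_instance

-- ===== CLAIM (what is proved, stated in full; the proofs are below) =====
def Claim_equal_solution : Prop := ∀ (k : Int) (tangerine : List Int), Dom_solution k tangerine → Pre_solution k tangerine → Spec_solution k tangerine (solution k tangerine)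

-- ===== LEMMAS AND PROOFS =====

-- A's loop, restated over the DESCENDING list (A pops from the end of the ascending one)
def scanD (k : Int) : List Int → Int → Int → Int
  | [], _, _ => 0
  | x :: rest, temt, cnt => if temt + x ≥ k then cnt + 1 else scanD k rest (temt + x) (cnt + 1)

lemma loopA_eq_scanD (k : Int) (D : List Int) : ∀ (temt cnt : Int),
    solLoopA k D.reverse temt cnt = scanD k D temt cnt := by
  induction D with
  | nil =>
    intro temt cnt
    unfold solLoopA
    split
    · rfl
    · next C B' heq =>
      exact absurd heq (by simp [PySem.List.pop?, PySem.List.pyIdx?])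
  | cons C D' ih =>
    intro temt cnt
    have hpop : PySem.List.pop? (C :: D').reverse (-1) = some (C, D'.reverse) := by
      simp [PySem.List.pop?_last]
    unfold solLoopA
    split
    · next heq => rw [hpop] at heq; cases heq
    · next C1 B1 heq =>
      rw [hpop] at heq
      injection heq with heq'
      obtain ⟨rfl, rfl⟩ := (Prod.mk.injEq ..).mp heq'
      simp only [scanD]
      split_ifs with h
      · rfl
      · exact ih (temt + C) (cnt + 1)

-- sorted descending = reverse of sorted ascending (Int values: fully determined by the multiset)
lemma sorted_rev_eq_reverse_sorted (xs : List Int) :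
    PySem.List.sorted xs (fun x => x) true = (PySem.List.sorted xs (fun x => x) false).reverse := by
  have h1 := PySem.List.sorted_pairwise_rev (xs := xs) (key := fun x => x)
  have h2 := PySem.List.sorted_pairwise (xs := xs) (key := fun x => x)
  have hrev : ((PySem.List.sorted xs (fun x => x) true).reverse).Pairwise
      (fun a b => (a : Int) ≤ b) := by
    rw [List.pairwise_reverse]; exact h1
  have hperm : ((PySem.List.sorted xs (fun x => x) true).reverse).Perm
      (PySem.List.sorted xs (fun x => x) false) :=
    (List.reverse_perm _).trans
      ((PySem.List.sorted_perm xs (fun x => x) true).trans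
        (PySem.List.sorted_perm xs (fun x => x) false).symm)
  have := PySem.List.eq_of_perm_of_pairwise_le_of_injective (fun x : Int => x)
      (fun _ _ h => h) hperm hrev h2
  calc PySem.List.sorted xs (fun x => x) true
      = ((PySem.List.sorted xs (fun x => x) true).reverse).reverse := by simp
    _ = _ := by rw [this]

-- ceiling division -(-a // c) and its bracket facts
lemma cdiv_le_one {a c : Int} (hc : 0 < c) (h : a ≤ c) : -(PySem.Int.floordiv (-a) c) ≤ 1 := by
  have hq := (PySem.Int.neg_floordiv_neg_eq_iff_of_pos (a := a) (q := -(PySem.Int.floordiv (-a) c)) hc).mp rfl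
  nlinarith [hq.1, hq.2]

lemma two_le_cdiv {a c : Int} (hc : 0 < c) (h : c < a) : 2 ≤ -(PySem.Int.floordiv (-a) c) := by
  have hq := (PySem.Int.neg_floordiv_neg_eq_iff_of_pos (a := a) (q := -(PySem.Int.floordiv (-a) c)) hc).mp rfl
  nlinarith [hq.1, hq.2]

lemma cdiv_sub {a c : Int} (hc : 0 < c) :
    -(PySem.Int.floordiv (-(a - c)) c) = -(PySem.Int.floordiv (-a) c) - 1 := by
  have hq := (PySem.Int.neg_floordiv_neg_eq_iff_of_pos (a := a) (q := -(PySem.Int.floordiv (-a) c)) hc).mp rfl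
  exact (PySem.Int.neg_floordiv_neg_eq_iff_of_pos hc).mpr (by constructor <;> nlinarith [hq.1, hq.2])

-- one whole bucket of n+1 kinds, each of size c, consumed by A's scan
lemma scanD_replicate (k c : Int) (hc : 1 ≤ c) : ∀ (n : Nat) (rest : List Int) (temt cnt : Int),
    scanD k (List.replicate (n+1) c ++ rest) temt cnt =
      if k - temt ≤ ((n:Int)+1) * c then cnt + max 1 (-(PySem.Int.floordiv (-(k - temt)) c))
      else scanD k rest (temt + ((n:Int)+1) * c) (cnt + ((n:Int)+1)) := by
  intro n
  induction n with
  | zero =>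
    intro rest temt cnt
    simp only [List.replicate, List.cons_append, List.nil_append, scanD]
    split_ifs with h1 h2 h2
    · have hle : max 1 (-(PySem.Int.floordiv (-(k - temt)) c)) = 1 := by
        have := cdiv_le_one (a := k - temt) (c := c) (hc := by omega) (by omega)
        omega
      rw [hle]
    · omega
    · omega
    · norm_num
  | succ n ih =>
    intro rest temt cnt
    have hstep : List.replicate (n+1+1) c ++ rest = c :: (List.replicate (n+1) c ++ rest) := by
      simp [List.replicate_succ]
    rw [hstep]
    simp only [scanD]
    split_ifs with h1 h2 h2
    · have hle : max 1 (-(PySem.Int.floordiv (-(k - temt)) c)) = 1 := by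
        have := cdiv_le_one (a := k - temt) (c := c) (hc := by omega) (by omega)
        omega
      rw [hle]
    · exfalso; push_cast at h2; nlinarith
    · -- temt + c < k, still finishing inside this bucket
      rw [ih rest (temt + c) (cnt + 1)]
      have hcond : k - (temt + c) ≤ ((n:Int)+1) * c := by push_cast at h2 ⊢; nlinarith
      rw [if_pos hcond]
      have hgt : c < k - temt := by omega
      have h2le := two_le_cdiv (a := k - temt) (c := c) (hc := by omega) hgt
      have hsub : -(PySem.Int.floordiv (-(k - (temt + c))) c) = -(PySem.Int.floordiv (-(k - temt)) c) - 1 := by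
        have := cdiv_sub (a := k - temt) (c := c) (hc := by omega)
        rw [show k - (temt + c) = k - temt - c by ring, this]
      rw [hsub]
      omega
    · rw [ih rest (temt + c) (cnt + 1)]
      have hcond : ¬ (k - (temt + c) ≤ ((n:Int)+1) * c) := by push_cast at h2 ⊢; nlinarith
      rw [if_neg hcond]
      congr 1 <;> push_cast <;> ring

-- counting in a flatMap of replicate blocks over a Nodup index list
lemma count_flatMap_replicate (l : List Int) : ∀ (s : List Int), s.Nodup → ∀ (x : Int),
    (s.flatMap fun c => List.replicate (l.count c) c).count x
      = if x ∈ s then l.count x else 0 := by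
  intro s
  induction s with
  | nil => intro _ x; simp
  | cons c rest ih =>
    intro hnd x
    have hndr := (List.nodup_cons.mp hnd).2
    have hnm := (List.nodup_cons.mp hnd).1
    simp only [List.flatMap_cons, List.count_append, ih hndr x, List.count_replicate,
      List.mem_cons]
    by_cases hx : x = c
    · subst hx
      simp [hnm]
    · simp [Ne.symm hx, hx]

lemma perm_flatMap_replicate (l s : List Int) (hnd : s.Nodup) (hmem : ∀ x, x ∈ s ↔ x ∈ l) :
    (s.flatMap fun c => List.replicate (l.count c) c).Perm l := by
  rw [List.perm_iff_count]
  intro x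
  rw [count_flatMap_replicate l s hnd x]
  by_cases hx : x ∈ s
  · simp [hx]
  · have : x ∉ l := fun h => hx ((hmem x).mpr h)
    simp [hx, List.count_eq_zero_of_not_mem this]

lemma pairwise_flatMap_replicate (s : List Int) (f : Int → Nat) (h : s.Pairwise (· ≤ ·)) :
    (s.flatMap fun c => List.replicate (f c) c).Pairwise (· ≤ ·) := by
  induction s with
  | nil => simp
  | cons c rest ih =>
    have hp := (List.pairwise_cons.mp h).2
    have hle := (List.pairwise_cons.mp h).1
    simp only [List.flatMap_cons]
    rw [List.pairwise_append]
    refine ⟨List.pairwise_replicate.mpr (Or.inr le_rfl), ih hp, ?_⟩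
    intro x hx y hy
    have hxc : x = c := List.eq_of_mem_replicate hx
    obtain ⟨c', hc', hy'⟩ := List.mem_flatMap.mp hy
    have hyc : y = c' := List.eq_of_mem_replicate hy'
    subst hxc; subst hyc
    exact hle _ hc'

-- sorted values, grouped: ascending sort = flatMap of replicate blocks over the ascending distinct sizes
lemma sorted_eq_flatMap (l : List Int) :
    PySem.List.sorted l (fun x => x) false =
      (PySem.List.sorted (PySem.Set.ofList l) (fun x => x) false).flatMap
        (fun c => List.replicate (l.count c) c) := by
  set s := PySem.List.sorted (PySem.Set.ofList l) (fun x => x) false with hs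
  have hnd : s.Nodup := ((PySem.List.sorted_perm _ _ _).nodup_iff).mpr (PySem.Set.nodup_ofList l)
  have hmem : ∀ x, x ∈ s ↔ x ∈ l := by
    intro x
    rw [hs, PySem.List.mem_sorted, PySem.Set.mem_ofList]
  have hperm := perm_flatMap_replicate l s hnd hmem
  have hpair : (s.flatMap fun c => List.replicate (l.count c) c).Pairwise (· ≤ ·) :=
    pairwise_flatMap_replicate s _ (PySem.List.sorted_pairwise (xs := PySem.Set.ofList l) (key := fun x => x))
  exact PySem.List.sorted_id_eq_of_perm_of_pairwise l _ hperm hpair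

-- descending variant (what A's pop order and B's size order both follow)
lemma sorted_rev_eq_flatMap (l : List Int) :
    PySem.List.sorted l (fun x => x) true =
      (PySem.List.sorted (PySem.Set.ofList l) (fun x => x) true).flatMap
        (fun c => List.replicate (l.count c) c) := by
  rw [sorted_rev_eq_reverse_sorted l, sorted_eq_flatMap l, List.reverse_flatMap,
    sorted_rev_eq_reverse_sorted (PySem.Set.ofList l)]
  congr 1
  funext c
  simp [Function.comp, List.reverse_replicate]

-- A's scan over the grouped descending list computes B's bucket recursion
lemma scanD_eq_pickB (k : Int) (buckets : PySem.Dict Int Int) (l : List Int) :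
    ∀ (s : List Int), s ≠ [] →
      (∀ c ∈ s, 1 ≤ c) → (∀ c ∈ s, 1 ≤ l.count c) →
      (∀ c ∈ s, buckets.getD c 0 = (l.count c : Int)) →
      ∀ (temt cnt : Int),
        k - temt ≤ (s.flatMap fun c => List.replicate (l.count c) c).sum →
        scanD k (s.flatMap fun c => List.replicate (l.count c) c) temt cnt
          = cnt + pickB buckets (k - temt) s := by
  intro s
  induction s with
  | nil => intro h; exact absurd rfl h
  | cons c rest ih =>
    intro _ hc hcnt hgetD temt cnt hle
    obtain ⟨n, hn⟩ : ∃ n : Nat, l.count c = n + 1 := by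
      have := hcnt c (List.mem_cons_self ..)
      exact ⟨l.count c - 1, by omega⟩
    have hc1 : (1:Int) ≤ c := hc c (List.mem_cons_self ..)
    simp only [List.flatMap_cons] at hle ⊢
    rw [hn] at hle ⊢
    rw [scanD_replicate k c hc1 n _ temt cnt]
    simp only [pickB, hgetD c (List.mem_cons_self ..), hn]
    push_cast
    split_ifs with h1
    · rfl
    · have hsum : (rest.flatMap fun c => List.replicate (l.count c) c).sum ≥ k - temt - ((n:Int)+1)*c := by
        rw [List.sum_append] at hle
        have : (List.replicate (n+1) c).sum = ((n:Int)+1) * c := by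
          rw [List.sum_replicate]
          push_cast [nsmul_eq_mul]
          ring
        omega
      have hrest : rest ≠ [] := by
        intro hr
        rw [hr] at hsum
        simp at hsum
        nlinarith
      rw [ih hrest (fun x hx => hc x (List.mem_cons_of_mem _ hx))
        (fun x hx => hcnt x (List.mem_cons_of_mem _ hx))
        (fun x hx => hgetD x (List.mem_cons_of_mem _ hx))
        (temt + ((n:Int)+1)*c) (cnt + ((n:Int)+1)) (by omega)]
      have : k - (temt + ((n:Int)+1)*c) = k - temt - ((n:Int)+1)*c := by ring
      rw [this]
      omega

-- the values of Counter(tangerine): positive, and summing to the length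
lemma values_counter_eq_map (t : List Int) :
    (PySem.Dict.counter t).values
      = (PySem.Set.ofList t).map (fun c => ((t.count c : Nat) : Int)) := by
  rw [PySem.Dict.values_eq_map_keys _ (PySem.Dict.nodup_keys_counter t) 0, PySem.Dict.keys_counter]
  exact List.map_congr_left (fun c _ => PySem.Dict.getD_counter t c)

lemma values_counter_pos (t : List Int) :
    ∀ v ∈ (PySem.Dict.counter t).values, 1 ≤ v := by
  intro v hv
  rw [values_counter_eq_map] at hv
  obtain ⟨c, hc, rfl⟩ := List.mem_map.mp hv
  have : c ∈ t := (PySem.Set.mem_ofList t c).mp hc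
  have := List.count_pos_iff.mpr this
  omega

lemma values_counter_sum (t : List Int) :
    (PySem.Dict.counter t).values.sum = (t.length : Int) := by
  rw [values_counter_eq_map]
  have hnd := PySem.Set.nodup_ofList t
  have hfin : (PySem.Set.ofList t).toFinset = t.toFinset := by
    apply Finset.ext
    intro a
    simp [List.mem_toFinset, PySem.Set.mem_ofList]
  calc ((PySem.Set.ofList t).map (fun c => ((t.count c : Nat) : Int))).sum
      = (PySem.Set.ofList t).toFinset.sum (fun c => ((t.count c : Nat) : Int)) :=
        (List.sum_toFinset _ hnd).symm
    _ = t.toFinset.sum (fun c => ((t.count c : Nat) : Int)) := by rw [hfin]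
    _ = ((∑ c ∈ t.toFinset, t.count c : Nat) : Int) := by push_cast [Nat.cast_sum]; rfl
    _ = (t.length : Int) := by rw [List.sum_toFinset_count_eq_length]

lemma values_counter_ne_nil (t : List Int) (ht : t ≠ []) :
    (PySem.Dict.counter t).values ≠ [] := by
  rw [values_counter_eq_map]
  intro h
  have := List.map_eq_nil_iff.mp h
  obtain ⟨x, hx⟩ := List.exists_mem_of_ne_nil t ht
  exact absurd this (List.ne_nil_of_mem ((PySem.Set.mem_ofList t x).mpr hx))

-- ===== VERDICT (by name: the statement is the Claim_ definition above) =====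
theorem solution_spec : Claim_equal_solution := by
  intro k t _ hpre
  obtain ⟨htne, hk⟩ := hpre
  simp only [Spec_solution, solution, solution_alt]
  set V := (PySem.Dict.counter t).values with hV
  set buckets := PySem.Dict.counter V with hB
  set S := PySem.List.sorted buckets.keys (fun x => x) true with hS
  have hkeys : buckets.keys = PySem.Set.ofList V := PySem.Dict.keys_counter V
  -- A's loop = scan of the descending sort
  have h1 : solLoopA k (PySem.List.sorted V (fun x => x) false) 0 0
      = scanD k (PySem.List.sorted V (fun x => x) true) 0 0 := by
    have hrev : PySem.List.sorted V (fun x => x) false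
        = (PySem.List.sorted V (fun x => x) true).reverse := by
      rw [sorted_rev_eq_reverse_sorted V, List.reverse_reverse]
    rw [hrev]
    exact loopA_eq_scanD k _ 0 0
  -- the descending sort, grouped by distinct size
  have h2 : PySem.List.sorted V (fun x => x) true
      = S.flatMap (fun c => List.replicate (V.count c) c) := by
    rw [sorted_rev_eq_flatMap V, hS, hkeys]
  -- membership facts about S
  have hmemS : ∀ c, c ∈ S → c ∈ V := by
    intro c hc
    rw [hS, PySem.List.mem_sorted, hkeys, PySem.Set.mem_ofList] at hc
    exact hc
  have hSne : S ≠ [] := by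
    rw [hS, Ne, PySem.List.sorted_eq_nil_iff, hkeys]
    intro h
    obtain ⟨x, hx⟩ := List.exists_mem_of_ne_nil V (values_counter_ne_nil t htne)
    exact absurd h (List.ne_nil_of_mem ((PySem.Set.mem_ofList V x).mpr hx))
  -- the scan computes B's bucket recursion
  have h3 : scanD k (S.flatMap fun c => List.replicate (V.count c) c) 0 0
      = 0 + pickB buckets (k - 0) S := by
    apply scanD_eq_pickB k buckets V S hSne
    · exact fun c hc => values_counter_pos t c (hmemS c hc)
    · exact fun c hc => List.count_pos_iff.mpr (hmemS c hc)
    · exact fun c _ => PySem.Dict.getD_counter V c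
    · rw [← h2]
      have := (PySem.List.sorted_perm V (fun x => x) true).sum_eq
      rw [this, hV, values_counter_sum t]
      omega
  rw [h1, h2, h3]
  norm_num
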